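-- pv_equiv track=rewrite | github.com/Ivanmartinez22/Projects-Listed-On-Resume | CacheProject/cachesimulator.py | cache_range_find_int
-- ===== SOURCE A (Python) =====
-- def cache_range_find_int(address_int):
--     if(address_int == 0):
--         return [0,8]
--     if(address_int % 8 == 0):
--         return [address_int,address_int+8]
--     while(address_int % 8 != 0):
--         address_int += 1
--     end_num = address_int
--     start_num = end_num - 8
--     return_list = [start_num,end_num]
--     return return_list
-- ===== SOURCE B (Python) =====
-- def cache_range_find_int(address_int):
--     end_num = (address_int // 8 + 1) * 8
--     return [end_num - 8, end_num]
-- ===== Notes on version B (the rewrite author's own statement) =====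
-- stated objective: simpler
-- what changed: Replaced the increment-until-multiple-of-8 loop and the two special-case branches with a single closed-form floor-division formula end=(n//8+1)*8, returning [end-8, end].
import Mathlib
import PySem

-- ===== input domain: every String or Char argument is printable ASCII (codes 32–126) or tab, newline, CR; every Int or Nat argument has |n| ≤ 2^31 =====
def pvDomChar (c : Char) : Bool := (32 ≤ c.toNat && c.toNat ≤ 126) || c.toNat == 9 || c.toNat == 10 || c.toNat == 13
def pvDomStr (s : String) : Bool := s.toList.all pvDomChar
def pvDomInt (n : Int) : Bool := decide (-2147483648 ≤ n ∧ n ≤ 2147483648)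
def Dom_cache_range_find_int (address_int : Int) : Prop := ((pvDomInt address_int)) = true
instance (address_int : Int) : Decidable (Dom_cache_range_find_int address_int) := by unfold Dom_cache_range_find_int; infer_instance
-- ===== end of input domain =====

-- B replaces A's increment-until-multiple-of-8 loop and special-case branches with the closed form end=(n//8+1)*8 (simpler; same values).


-- ===== PORT A =====
-- the while loop increments until address_int % 8 == 0; it runs at most 7 steps, so fuel 8 makes it total without changing the computation
def cacheLoopA : Nat → Int → Int
  | 0, a => a
  | f + 1, a => if PySem.Int.mod a 8 ≠ 0 then cacheLoopA f (a + 1) else a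

def cache_range_find_int (address_int : Int) : List Int :=
  if address_int == 0 then [0, 8]
  else if PySem.Int.mod address_int 8 == 0 then [address_int, address_int + 8]
  else
    let end_num := cacheLoopA 8 address_int
    let start_num := end_num - 8
    [start_num, end_num]

-- ===== PORT B =====
def cache_range_find_int_alt (address_int : Int) : List Int :=
  let end_num := (PySem.Int.floordiv address_int 8 + 1) * 8
  [end_num - 8, end_num]

-- ===== PRECONDITION & SPEC =====
def Spec_cache_range_find_int (address_int : Int) (out : List Int) : Prop := out = cache_range_find_int_alt address_int
instance (address_int : Int) (out : List Int) : Decidable (Spec_cache_range_find_int address_int out) := by unfold Spec_cache_range_find_int; infer_instance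

-- ===== CLAIM (what is proved, stated in full; the proofs are below) =====
def Claim_equal_cache_range_find_int : Prop := ∀ (address_int : Int), Dom_cache_range_find_int address_int → Spec_cache_range_find_int address_int (cache_range_find_int address_int)

-- ===== LEMMAS AND PROOFS =====
theorem cacheLoopA_eq (f : Nat) : ∀ n : Int, (8 - n % 8) % 8 ≤ (f : Int) →
    cacheLoopA f n = n + (8 - n % 8) % 8 := by
  induction f with
  | zero =>
    intro n h
    have : (8 - n % 8) % 8 = 0 := by omega
    simp [cacheLoopA, this]
  | succ f ih =>
    intro n h
    rw [cacheLoopA, PySem.Int.mod_eq_emod_of_pos (by norm_num)]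
    by_cases h0 : n % 8 = 0
    · simp [h0]
    · have := ih (n + 1) (by omega)
      simp only [h0, ne_eq, not_false_eq_true, if_true, this]
      omega

theorem cache_range_find_int_eq (n : Int) :
    cache_range_find_int n = cache_range_find_int_alt n := by
  unfold cache_range_find_int cache_range_find_int_alt
  rw [PySem.Int.mod_eq_emod_of_pos (by norm_num), PySem.Int.floordiv_eq_ediv_of_pos (by norm_num)]
  simp only [beq_iff_eq]
  by_cases h0 : n = 0
  · subst h0; decide
  · rw [if_neg h0]
    by_cases hm : n % 8 = 0
    · rw [if_pos hm]
      simp only [List.cons.injEq, and_true]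
      omega
    · rw [if_neg hm, cacheLoopA_eq 8 n (by omega)]
      simp only [List.cons.injEq, and_true]
      omega

-- ===== VERDICT (by name: the statement is the Claim_ definition above) =====
theorem cache_range_find_int_spec : Claim_equal_cache_range_find_int := by
  intro n _
  exact cache_range_find_int_eq n
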